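-- pv_equiv track=rewrite | github.com/br-collab/ACT-Engine | core/taxonomy.py | _type_compatible
-- ===== SOURCE A (Python) =====
-- def _type_compatible(field_type: str, target_type: str) -> bool:
--     if field_type == "unknown" or target_type == "unknown":
--         return True
--     if field_type == target_type:
--         return True
--     compatible_groups = (
--         {"amount", "percentage", "rate", "metric"},
--         {"identifier", "name"},
--         {"category", "status"},
--     )
--     return any(field_type in group and target_type in group for group in compatible_groups)
-- ===== SOURCE B (Python) =====
-- def _canon(t: str) -> str:
--     """Map a type to its compatibility-group representative; unknown-to-the-table types represent themselves."""
--     if t in ("percentage", "rate", "metric"):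
--         return "amount"
--     if t == "name":
--         return "identifier"
--     if t == "status":
--         return "category"
--     return t
--
--
-- def _type_compatible(field_type: str, target_type: str) -> bool:
--     return (
--         field_type == "unknown"
--         or target_type == "unknown"
--         or _canon(field_type) == _canon(target_type)
--     )
-- ===== Notes on version B (the rewrite author's own statement) =====
-- stated objective: alternative
-- what changed: Instead of scanning a tuple of compatibility sets for a group containing both types, B normalizes each type independently to a canonical group representative and compares the two canonical forms once; the equality guard and the group scan both disappear.
import Mathlib
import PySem

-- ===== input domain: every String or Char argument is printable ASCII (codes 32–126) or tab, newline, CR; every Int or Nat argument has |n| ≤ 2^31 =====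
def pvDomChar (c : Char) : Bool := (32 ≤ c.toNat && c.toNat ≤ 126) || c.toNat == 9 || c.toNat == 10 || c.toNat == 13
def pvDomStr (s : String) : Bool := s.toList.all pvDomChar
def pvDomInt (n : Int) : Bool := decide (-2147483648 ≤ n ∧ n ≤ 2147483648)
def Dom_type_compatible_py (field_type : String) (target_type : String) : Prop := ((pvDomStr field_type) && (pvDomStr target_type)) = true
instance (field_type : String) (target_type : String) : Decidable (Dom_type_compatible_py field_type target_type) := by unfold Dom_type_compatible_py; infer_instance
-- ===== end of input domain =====

-- B normalizes each type to a canonical group representative and compares the two canonical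
-- forms once, instead of A's scan over the tuple of compatibility sets (alternative).

-- ===== PORT A =====
def type_compatible_py (field_type : String) (target_type : String) : Bool :=
  if field_type = "unknown" || target_type = "unknown" then true
  else if field_type = target_type then true
  else
    let compatible_groups : List (PySem.Set String) :=
      [PySem.Set.ofList ["amount", "percentage", "rate", "metric"],
       PySem.Set.ofList ["identifier", "name"],
       PySem.Set.ofList ["category", "status"]]
    compatible_groups.any (fun group =>
      PySem.Set.contains group field_type && PySem.Set.contains group target_type)

-- ===== PORT B =====
-- map a type to its compatibility-group representative; other types represent themselves
def pvCanon (t : String) : String :=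
  if t = "percentage" || t = "rate" || t = "metric" then "amount"
  else if t = "name" then "identifier"
  else if t = "status" then "category"
  else t

def type_compatible_py_alt (field_type : String) (target_type : String) : Bool :=
  field_type = "unknown" || target_type = "unknown"
    || pvCanon field_type = pvCanon target_type

-- ===== PRECONDITION & SPEC =====
def Spec_type_compatible_py (field_type : String) (target_type : String) (out : Bool) : Prop := out = type_compatible_py_alt field_type target_type
instance (field_type : String) (target_type : String) (out : Bool) : Decidable (Spec_type_compatible_py field_type target_type out) := by unfold Spec_type_compatible_py; infer_instance

-- ===== CLAIM (what is proved, stated in full; the proofs are below) =====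
def Claim_equal_type_compatible_py : Prop := ∀ (field_type : String) (target_type : String), Dom_type_compatible_py field_type target_type → Spec_type_compatible_py field_type target_type (type_compatible_py field_type target_type)

-- ===== LEMMAS AND PROOFS =====
-- the eight group members
def pvKeys : List String :=
  ["amount", "percentage", "rate", "metric", "identifier", "name", "category", "status"]

-- outside the table, pvCanon is the identity
theorem pvCanon_id {t : String} (h : t ∉ pvKeys) : pvCanon t = t := by
  simp only [pvKeys, List.mem_cons, not_or, List.not_mem_nil] at h
  obtain ⟨-, h2, h3, h4, -, h6, -, h8, -⟩ := h
  simp [pvCanon, h2, h3, h4, h6, h8]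

-- ===== VERDICT (by name: the statement is the Claim_ definition above) =====
theorem type_compatible_py_spec : Claim_equal_type_compatible_py := by
  intro ft tt _
  unfold Spec_type_compatible_py type_compatible_py type_compatible_py_alt
  split_ifs with hu he
  · simp only [Bool.or_eq_true, decide_eq_true_eq] at hu
    rcases hu with h | h <;> simp [h]
  · subst he
    simp
  · simp only [Bool.or_eq_true, decide_eq_true_eq, not_or] at hu
    obtain ⟨hu1, hu2⟩ := hu
    dsimp only
    by_cases hf : ft ∈ pvKeys
    · simp only [pvKeys, List.mem_cons, List.not_mem_nil, or_false] at hf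
      by_cases ht : tt ∈ pvKeys
      · simp only [pvKeys, List.mem_cons, List.not_mem_nil, or_false] at ht
        rcases hf with rfl|rfl|rfl|rfl|rfl|rfl|rfl|rfl <;>
          rcases ht with rfl|rfl|rfl|rfl|rfl|rfl|rfl|rfl <;> decide
      · have hc := pvCanon_id ht
        simp only [pvKeys, List.mem_cons, not_or, List.not_mem_nil] at ht
        obtain ⟨t1, t2, t3, t4, t5, t6, t7, t8, -⟩ := ht
        rcases hf with rfl|rfl|rfl|rfl|rfl|rfl|rfl|rfl <;>
          simp [PySem.Set.ofList, PySem.Set.contains, pvCanon, hc, hu1, hu2,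
            Ne.symm t1, Ne.symm t2, Ne.symm t3, Ne.symm t4,
            Ne.symm t5, Ne.symm t6, Ne.symm t7, Ne.symm t8,
            t1, t2, t3, t4, t5, t6, t7, t8]
    · have hcf := pvCanon_id hf
      simp only [pvKeys, List.mem_cons, not_or, List.not_mem_nil] at hf
      obtain ⟨f1, f2, f3, f4, f5, f6, f7, f8, -⟩ := hf
      by_cases ht : tt ∈ pvKeys
      · have : pvCanon tt ∈ pvKeys := by
          simp only [pvKeys, List.mem_cons, List.not_mem_nil, or_false] at ht ⊢
          rcases ht with rfl|rfl|rfl|rfl|rfl|rfl|rfl|rfl <;> simp [pvCanon]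
        have hne : pvCanon ft ≠ pvCanon tt := by
          rw [hcf]; intro hh; rw [← hh] at this
          simp only [pvKeys, List.mem_cons, List.not_mem_nil, or_false] at this
          tauto
        simp only [pvKeys, List.mem_cons, List.not_mem_nil, or_false] at ht
        rcases ht with rfl|rfl|rfl|rfl|rfl|rfl|rfl|rfl <;>
          simp [PySem.Set.ofList, PySem.Set.contains, hne, hu1, hu2,
            f1, f2, f3, f4, f5, f6, f7, f8]
      · have hct := pvCanon_id ht
        simp [PySem.Set.ofList, PySem.Set.contains, hcf, hct, hu1, hu2, he,
          f1, f2, f3, f4, f5, f6, f7, f8]
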